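-- pv_equiv track=rewrite | github.com/ml-jku/Chem-xLSTM | chemxlstm/fasta_utils.py | learn_label_encoding
-- ===== SOURCE A (Python) =====
-- from typing import Dict, List, Union
--
-- def learn_label_encoding(tokenized_inputs: List[List[str]]) -> Dict[str, int]:
--     """Learn a label encoding from a tokenized dataset. The padding token, `"[PAD]"` is always assigned the label 0.
--
--     Parameters
--     ----------
--     tokenized_inputs : List[List[str]]
--         FASTA of the protein sequence in the dataset, tokenized into a list of tokens.
--
--     Returns
--     -------
--     Dict[str, int]
--         A dictionary mapping FASTA tokens to integer labels.
--     """
--     token2label = dict()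
--     token2label["[PAD]"] = len(token2label)
--     for inp in tokenized_inputs:
--         for token in inp:
--             if token not in token2label:
--                 token2label[token] = len(token2label)
--
--     return token2label
-- ===== SOURCE B (Python) =====
-- def learn_label_encoding(tokenized_inputs):
--     tokens = ["[PAD]"]
--     for inp in tokenized_inputs:
--         tokens.extend(inp)
--     return {tok: i for i, tok in enumerate(dict.fromkeys(tokens))}
-- ===== Notes on version B (the rewrite author's own statement) =====
-- stated objective: idiomatic
-- what changed: Instead of scanning nested loops with a membership test and len()-based label assignment, B flattens all tokens into one list, deduplicates it with dict.fromkeys (order-preserving), and assigns labels in a separate enumerate pass.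
import Mathlib
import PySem

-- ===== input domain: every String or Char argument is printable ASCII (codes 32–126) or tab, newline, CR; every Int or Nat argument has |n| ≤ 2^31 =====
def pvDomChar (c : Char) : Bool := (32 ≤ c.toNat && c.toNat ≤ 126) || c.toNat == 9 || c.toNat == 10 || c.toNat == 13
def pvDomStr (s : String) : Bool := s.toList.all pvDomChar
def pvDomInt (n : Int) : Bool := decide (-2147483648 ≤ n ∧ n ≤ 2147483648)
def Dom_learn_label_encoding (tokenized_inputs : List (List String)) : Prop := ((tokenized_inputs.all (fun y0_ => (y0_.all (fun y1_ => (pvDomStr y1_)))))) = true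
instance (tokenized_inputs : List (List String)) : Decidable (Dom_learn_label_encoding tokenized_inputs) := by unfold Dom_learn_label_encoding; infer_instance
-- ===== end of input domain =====

-- B replaces A's nested membership-testing loops by flatten + ordered dedup (dict.fromkeys) + a separate enumerate pass; same cost, more idiomatic.

-- ===== PORT A =====
def learn_label_encoding (tokenized_inputs : List (List String)) : List (String × Int) :=
  let token2label : PySem.Dict String Int := PySem.Dict.empty
  let token2label := token2label.insert "[PAD]" (token2label.items.length : Int)
  let token2label := tokenized_inputs.foldl (fun d inp =>
    inp.foldl (fun d token =>
      if ¬ (d.contains token) then d.insert token (d.items.length : Int) else d) d) token2label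
  token2label.items

-- ===== PORT B =====
def learn_label_encoding_alt (tokenized_inputs : List (List String)) : List (String × Int) :=
  let tokens := tokenized_inputs.foldl (fun acc inp => acc ++ inp) ["[PAD]"]
  (PySem.List.enumerate (PySem.List.dedup tokens) 0).map (fun p => (p.2, p.1))

-- ===== PRECONDITION & SPEC =====
def Spec_learn_label_encoding (tokenized_inputs : List (List String)) (out : List (String × Int)) : Prop := out = learn_label_encoding_alt tokenized_inputs
instance (tokenized_inputs : List (List String)) (out : List (String × Int)) : Decidable (Spec_learn_label_encoding tokenized_inputs out) := by unfold Spec_learn_label_encoding; infer_instance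

-- ===== CLAIM (what is proved, stated in full; the proofs are below) =====
def Claim_equal_learn_label_encoding : Prop := ∀ (tokenized_inputs : List (List String)), Dom_learn_label_encoding tokenized_inputs → Spec_learn_label_encoding tokenized_inputs (learn_label_encoding tokenized_inputs)

-- ===== LEMMAS AND PROOFS =====

-- the encoding of an ordered duplicate-free token list: token ↦ its position
def pvEnc (s : List String) : List (String × Int) :=
  (PySem.List.enumerate s 0).map (fun p => (p.2, p.1))

lemma pvEnc_keys (s : List String) : (pvEnc s).map (·.1) = s := by
  simp [pvEnc, List.map_map, Function.comp_def]

lemma pvEnc_append_singleton (s : List String) (t : String) :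
    pvEnc (s ++ [t]) = pvEnc s ++ [(t, (s.length : Int))] := by
  simp [pvEnc, PySem.List.enumerate_append, PySem.List.enumerate_cons, PySem.List.enumerate_nil]

lemma pvEnc_length (s : List String) : (pvEnc s).length = s.length := by
  simp [pvEnc, PySem.List.length_enumerate]

-- A's conditional-insert loop over a flat token list, started from the dict encoding s, yields the dict encoding s.update(l)
lemma pvLoop_eq (l : List String) (s : List String) (hs : s.Nodup) :
    l.foldl (fun d token =>
      if ¬ (d.contains token) then d.insert token (d.items.length : Int) else d)
      (PySem.Dict.mk (pvEnc s))
    = PySem.Dict.mk (pvEnc (PySem.Set.update s l)) := by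
  induction l generalizing s with
  | nil => simp [PySem.Set.update]
  | cons t l ih =>
    have hkeys : (PySem.Dict.mk (pvEnc s)).keys = s := by
      simpa [PySem.Dict.keys] using pvEnc_keys s
    have hcont : (PySem.Dict.mk (pvEnc s)).contains t = decide (t ∈ s) := by
      rw [PySem.Dict.contains_eq_decide_mem_keys, hkeys]
    by_cases hmem : t ∈ s
    · have : PySem.Set.update s (t :: l) = PySem.Set.update s l := by
        rw [PySem.Set.update_cons, PySem.Set.add_of_mem hmem]
      rw [this, ← ih s hs]
      simp [List.foldl_cons, hcont, hmem]
    · have hadd : PySem.Set.update s (t :: l) = PySem.Set.update (s ++ [t]) l := by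
        rw [PySem.Set.update_cons, PySem.Set.add_of_not_mem hmem]
      have hins : (PySem.Dict.mk (pvEnc s)).insert t (((PySem.Dict.mk (pvEnc s)).items.length : Nat) : Int)
          = PySem.Dict.mk (pvEnc (s ++ [t])) := by
        apply PySem.Dict.ext
        rw [PySem.Dict.items_insert_of_not_contains]
        · simp [pvEnc_append_singleton, pvEnc_length]
        · simp [hcont, hmem]
      rw [hadd, ← ih (s ++ [t]) (by simp [List.nodup_append, hs]; exact fun a ha h => hmem (h ▸ ha))]
      simp only [List.foldl_cons, hcont]
      simp [hmem, hins]

lemma pvFoldl_append (l : List (List String)) (acc : List String) :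
    l.foldl (fun a x => a ++ x) acc = acc ++ l.flatten := by
  induction l generalizing acc with
  | nil => simp
  | cons x l ih => simp [List.foldl_cons, ih, List.append_assoc]

-- ===== VERDICT (by name: the statement is the Claim_ definition above) =====
theorem learn_label_encoding_spec : Claim_equal_learn_label_encoding := by
  intro tokenized_inputs _
  show learn_label_encoding tokenized_inputs = learn_label_encoding_alt tokenized_inputs
  unfold learn_label_encoding learn_label_encoding_alt
  simp only [pvFoldl_append, ← List.foldl_flatten]
  have hd0 : (PySem.Dict.empty : PySem.Dict String Int).insert "[PAD]"
      (((PySem.Dict.empty : PySem.Dict String Int).items.length : Nat) : Int)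
      = PySem.Dict.mk (pvEnc ["[PAD]"]) := by decide
  rw [hd0, pvLoop_eq _ ["[PAD]"] (by simp)]
  have : PySem.List.dedup (["[PAD]"] ++ tokenized_inputs.flatten)
      = PySem.Set.update ["[PAD]"] tokenized_inputs.flatten := by
    rw [PySem.List.dedup_eq_ofList, PySem.Set.ofList_append]
    rfl
  rw [this]
  rfl
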